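-- pv_equiv track=rewrite | github.com/srilekhasomanchi/Food-Ordering-Application | FoodOrderingApplication/common_functions.py | is_double
-- ===== SOURCE A (Python) =====
-- def is_double(s):
--     fl = False
--     for x in s:
--         if ((ord(x)) >= ord('0') and ord(x)<=ord('9')):
--             continue
--         elif x == '.':
--             if fl or s[-1] == '.':
--                 return False
--             fl = True
--             continue
--         return False
--     return True
-- ===== SOURCE B (Python) =====
-- def is_double(s):
--     if s == "":
--         return True
--     if s[-1] == '.':
--         return False
--     return s.count('.') <= 1 and all('0' <= c <= '9' or c == '.' for c in s)
-- ===== Notes on version B (the rewrite author's own statement) =====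
-- stated objective: simpler
-- what changed: Replaced A's single stateful state-machine pass (flag for a seen dot, early returns) with a closed-form combination of three stateless scans: empty/trailing-dot guards, a dot count, and a character-class check.
import Mathlib
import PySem

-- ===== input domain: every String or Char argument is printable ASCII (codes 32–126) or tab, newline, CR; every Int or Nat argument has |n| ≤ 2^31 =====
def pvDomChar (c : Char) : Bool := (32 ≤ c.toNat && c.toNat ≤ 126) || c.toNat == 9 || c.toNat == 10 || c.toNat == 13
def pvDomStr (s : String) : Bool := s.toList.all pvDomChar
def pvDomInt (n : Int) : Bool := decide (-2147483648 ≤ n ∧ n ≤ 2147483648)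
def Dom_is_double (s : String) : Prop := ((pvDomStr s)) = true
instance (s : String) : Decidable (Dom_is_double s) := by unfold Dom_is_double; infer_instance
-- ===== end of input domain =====

-- B replaces A's one stateful state-machine pass by a closed-form combination of stateless
-- scans (empty/trailing-dot guards, dot count, character-class check); objective: simpler.

-- ===== PORT A =====
-- A's for-loop: state is the flag fl; `last?` is s[-1] (only compared when a '.' is met,
-- at which point the string is nonempty, so `last?` is `some` there).
-- `ord(x) >= ord('0') and ord(x) <= ord('9')` is exactly '0' ≤ x ∧ x ≤ '9' (code-point order).
def isDoubleLoop (last? : Option Char) : List Char → Bool → Bool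
  | [], _ => true
  | x :: xs, fl =>
    if '0' ≤ x ∧ x ≤ '9' then isDoubleLoop last? xs fl
    else if x = '.' then
      (if fl || last? = some '.' then false else isDoubleLoop last? xs true)
    else false

def is_double (s : String) : Bool :=
  isDoubleLoop (PySem.List.pyGet? s.toList (-1)) s.toList false

-- ===== PORT B =====
def is_double_alt (s : String) : Bool :=
  if s.toList = [] then true
  else if PySem.List.pyGet? s.toList (-1) = some '.' then false
  else decide (s.toList.count '.' ≤ 1)
       && s.toList.all (fun c => ('0' ≤ c && c ≤ '9') || c == '.')

-- ===== PRECONDITION & SPEC =====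
def Spec_is_double (s : String) (out : Bool) : Prop := out = is_double_alt s
instance (s : String) (out : Bool) : Decidable (Spec_is_double s out) := by unfold Spec_is_double; infer_instance

-- ===== CLAIM (what is proved, stated in full; the proofs are below) =====
def Claim_equal_is_double : Prop := ∀ (s : String), Dom_is_double s → Spec_is_double s (is_double s)

-- ===== LEMMAS AND PROOFS =====

-- closed-form characterisation of A's loop
theorem isDoubleLoop_eq (last? : Option Char) (l : List Char) (fl : Bool) :
    isDoubleLoop last? l fl =
      (l.all (fun c => ('0' ≤ c && c ≤ '9') || c == '.')
       && decide (l.count '.' + (if fl then 1 else 0) ≤ 1)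
       && !(decide ('.' ∈ l) && last? == some '.')) := by
  induction l generalizing fl with
  | nil => cases fl <;> simp [isDoubleLoop]
  | cons x xs ih =>
    by_cases hd : '0' ≤ x ∧ x ≤ '9'
    · have hx9 : x ≠ '.' := by
        intro h; subst h; exact absurd hd.1 (by decide)
      simp [isDoubleLoop, hd, ih, Ne.symm hx9, hx9, List.count_cons, hd.1, hd.2]
    · by_cases hx : x = '.'
      · subst hx
        cases fl with
        | true =>
          simp [isDoubleLoop, hd, List.count_cons]
        | false =>
          by_cases hl : last? = some '.'
          · simp [isDoubleLoop, hd, hl, List.count_cons]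
          · have hb : (last? == some '.') = false := by simp [hl]
            simp [isDoubleLoop, hd, hl, ih, List.count_cons, hb]
      · have hnd : ('0' ≤ x && x ≤ '9') = false := by
          rcases not_and_or.mp hd with h | h <;> simp [h]
        simp [isDoubleLoop, hd, hx, hnd]

-- ===== VERDICT (by name: the statement is the Claim_ definition above) =====
theorem is_double_spec : Claim_equal_is_double := by
  intro s _
  unfold Spec_is_double is_double is_double_alt
  rw [isDoubleLoop_eq, PySem.List.pyGet?_neg_one]
  by_cases hnil : s.toList = []
  · simp [hnil]
  · simp only [hnil, if_false]
    by_cases hlast : s.toList.getLast? = some '.'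
    · have hmem : '.' ∈ s.toList := by
        rcases List.getLast?_eq_some_iff.mp hlast with ⟨ys, hys⟩
        rw [hys]; simp
      simp [hlast, hmem]
    · have hb : (s.toList.getLast? == some '.') = false := by simp [hlast]
      simp [hlast, hb, Bool.and_comm]
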